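-- pv_equiv track=rewrite | github.com/CannonJunior/nfl-mock-draft | app/scrapers/twitter_nitter.py | _player_mentioned
-- ===== SOURCE A (Python) =====
-- from typing import Optional
--
-- def _player_mentioned(tweet_text: str, player_names: list[str]) -> Optional[str]:
--     """
--     Return the player name if any player is mentioned in the tweet text.
--
--     Checks full name first, then last name (if last name is ≥6 chars to
--     avoid false positives on common short surnames).
--
--     Args:
--         tweet_text (str): Raw tweet text.
--         player_names (list[str]): Full player names to check.
--
--     Returns:
--         Optional[str]: Matched player name, or None.
--     """
--     text_lower = tweet_text.lower()
--     for name in player_names: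
--         # Full name check
--         if name.lower() in text_lower:
--             return name
--         # Last name check (only for surnames ≥ 6 chars)
--         parts = name.split()
--         if len(parts) >= 2:
--             last = parts[-1]
--             if len(last) >= 6 and last.lower() in text_lower:
--                 return name
--     return None
-- ===== SOURCE B (Python) =====
-- def _player_mentioned(tweet_text, player_names):
--     """Multi-pattern scan: bucket patterns by first character, sweep the text
--     once, and keep the smallest (= earliest-listed) matching player index."""
--     text = tweet_text.lower()
--     pats = []
--     for i, name in enumerate(player_names):
--         pats.append((name.lower(), i))
--         parts = name.split()
--         if len(parts) >= 2 and len(parts[-1]) >= 6: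
--             pats.append((parts[-1].lower(), i))
--     best = len(player_names)
--     buckets = {}
--     for p, i in pats:
--         if p == "":
--             if i < best:
--                 best = i
--         else:
--             buckets.setdefault(p[0], []).append((p, i))
--     for j, c in enumerate(text):
--         for p, i in buckets.get(c, ()):
--             if i < best and text.startswith(p, j):
--                 best = i
--     return player_names[best] if best < len(player_names) else None
-- ===== Notes on version B (the rewrite author's own statement) =====
-- stated objective: alternative
-- what changed: A does a name-major loop running a full substring search of the tweet for each pattern; B builds a flat pattern list once, buckets patterns by first character, sweeps the text positions in one pass keeping the smallest matching player index, and finally indexes the name list.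
import Mathlib
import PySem

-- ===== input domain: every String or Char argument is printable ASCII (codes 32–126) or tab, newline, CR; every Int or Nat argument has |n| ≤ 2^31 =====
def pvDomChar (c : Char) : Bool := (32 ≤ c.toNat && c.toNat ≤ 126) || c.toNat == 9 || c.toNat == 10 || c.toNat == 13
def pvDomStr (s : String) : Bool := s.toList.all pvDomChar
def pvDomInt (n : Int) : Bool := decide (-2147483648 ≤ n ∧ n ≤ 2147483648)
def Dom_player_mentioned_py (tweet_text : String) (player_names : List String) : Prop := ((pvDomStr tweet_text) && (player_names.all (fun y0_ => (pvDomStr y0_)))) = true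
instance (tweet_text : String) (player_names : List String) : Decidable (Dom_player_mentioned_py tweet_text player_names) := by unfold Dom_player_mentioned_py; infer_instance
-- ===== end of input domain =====

-- B replaces A's name-major loop of per-pattern substring searches by a multi-pattern scan:
-- patterns are bucketed by first character, the text is swept once position by position,
-- and the smallest (= earliest-listed) matching player index is kept (objective: alternative).

-- ===== PORT A =====
-- the 'for name in player_names' loop with its early returns
def pmGoA (text_lower : String) : List String → Option String
  | [] => none
  | name :: rest =>
    if PySem.Str.isIn (PySem.Str.lower name) text_lower then some name
    else
      let parts := PySem.Str.split₀ name
      if 2 ≤ parts.length then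
        let last := PySem.List.pyGetD parts (-1) ""
        if 6 ≤ PySem.Str.len last ∧ PySem.Str.isIn (PySem.Str.lower last) text_lower then
          some name
        else pmGoA text_lower rest
      else pmGoA text_lower rest

def player_mentioned_py (tweet_text : String) (player_names : List String) : Option String :=
  pmGoA (PySem.Str.lower tweet_text) player_names

-- ===== PORT B =====
-- the 'for i, name in enumerate(player_names)' loop building the flat (pattern, index) list
def pmBPats (names : List String) : List (String × Int) :=
  (PySem.List.enumerate names).foldl (fun pats inm =>
    let pats' := pats ++ [(PySem.Str.lower inm.2, inm.1)]
    let parts := PySem.Str.split₀ inm.2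
    if 2 ≤ parts.length ∧ 6 ≤ PySem.Str.len (PySem.List.pyGetD parts (-1) "") then
      pats' ++ [(PySem.Str.lower (PySem.List.pyGetD parts (-1) ""), inm.1)]
    else pats') []

-- p[0] of a nonempty pattern (the bucket key)
def pmKey (p : String) : Char := (PySem.Str.pyGet? p 0).getD ' '

-- the 'for p, i in pats' loop: best over empty patterns, buckets for the rest
def pmBPrep (n : Int) (pats : List (String × Int)) :
    Int × PySem.Dict Char (List (String × Int)) :=
  pats.foldl (fun bb pi =>
    if pi.1 = "" then (if pi.2 < bb.1 then pi.2 else bb.1, bb.2)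
    else (bb.1, bb.2.modify (pmKey pi.1) [] (· ++ [pi])))
    (n, PySem.Dict.empty)

-- the 'for j, c in enumerate(text)' sweep; text.startswith(p, j) is text[j:].startswith(p)
def pmBScan (text : String) (buckets : PySem.Dict Char (List (String × Int)))
    (best0 : Int) : Int :=
  (PySem.List.enumerate text.toList).foldl (fun best jc =>
    (buckets.getD jc.2 []).foldl (fun best pi =>
      if pi.2 < best ∧ PySem.Str.startswith (PySem.Str.slice text (some jc.1) none) pi.1
      then pi.2 else best) best) best0

def player_mentioned_py_alt (tweet_text : String) (player_names : List String) : Option String :=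
  let text := PySem.Str.lower tweet_text
  let pats := pmBPats player_names
  let bb := pmBPrep (player_names.length : Int) pats
  let best := pmBScan text bb.2 bb.1
  if best < (player_names.length : Int) then
    some (PySem.List.pyGetD player_names best "")
  else none

-- ===== PRECONDITION & SPEC =====
def Spec_player_mentioned_py (tweet_text : String) (player_names : List String) (out : Option String) : Prop := out = player_mentioned_py_alt tweet_text player_names
instance (tweet_text : String) (player_names : List String) (out : Option String) : Decidable (Spec_player_mentioned_py tweet_text player_names out) := by unfold Spec_player_mentioned_py; infer_instance

-- ===== CLAIM (what is proved, stated in full; the proofs are below) =====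
def Claim_equal_player_mentioned_py : Prop := ∀ (tweet_text : String) (player_names : List String), Dom_player_mentioned_py tweet_text player_names → Spec_player_mentioned_py tweet_text player_names (player_mentioned_py tweet_text player_names)

-- ===== LEMMAS AND PROOFS =====

-- A's per-name test, as one boolean
def pmPredA (text name : String) : Bool :=
  PySem.Str.isIn (PySem.Str.lower name) text ||
    (decide (2 ≤ (PySem.Str.split₀ name).length) &&
      (decide (6 ≤ PySem.Str.len (PySem.List.pyGetD (PySem.Str.split₀ name) (-1) "")) &&
        PySem.Str.isIn (PySem.Str.lower (PySem.List.pyGetD (PySem.Str.split₀ name) (-1) "")) text))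

lemma pmGoA_cons (text name : String) (rest : List String) :
    pmGoA text (name :: rest) = if pmPredA text name then some name else pmGoA text rest := by
  simp only [pmGoA, pmPredA]
  by_cases h1 : PySem.Str.isIn (PySem.Str.lower name) text = true
  · have h1' : PySem.Chars.isIn (PySem.Chars.lower name.toList) text.toList = true := by
      simpa using h1
    simp [h1']
  · simp only [h1, Bool.false_or]
    by_cases h2 : 2 ≤ (PySem.Str.split₀ name).length
    · by_cases h3 : 6 ≤ PySem.Str.len (PySem.List.pyGetD (PySem.Str.split₀ name) (-1) "")
      · by_cases h4 : PySem.Str.isIn (PySem.Str.lower (PySem.List.pyGetD (PySem.Str.split₀ name) (-1) "")) text = true <;>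
          simp [h2, h3, h4]
      · simp [h2, h3]
    · simp [h2]

-- the patterns a single name contributes
def pmPats1 (name : String) : List String :=
  if 2 ≤ (PySem.Str.split₀ name).length ∧
      6 ≤ PySem.Str.len (PySem.List.pyGetD (PySem.Str.split₀ name) (-1) "") then
    [PySem.Str.lower name, PySem.Str.lower (PySem.List.pyGetD (PySem.Str.split₀ name) (-1) "")]
  else [PySem.Str.lower name]

lemma pmBPats_eq (names : List String) :
    pmBPats names = (PySem.List.enumerate names).flatMap
      (fun inm => (pmPats1 inm.2).map (fun p => (p, inm.1))) := by
  unfold pmBPats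
  have hstep : (fun (pats : List (String × Int)) (inm : Int × String) =>
      let pats' := pats ++ [(PySem.Str.lower inm.2, inm.1)]
      let parts := PySem.Str.split₀ inm.2
      if 2 ≤ parts.length ∧ 6 ≤ PySem.Str.len (PySem.List.pyGetD parts (-1) "") then
        pats' ++ [(PySem.Str.lower (PySem.List.pyGetD parts (-1) ""), inm.1)]
      else pats')
      = fun pats inm => pats ++ (pmPats1 inm.2).map (fun p => (p, inm.1)) := by
    funext pats inm
    by_cases h : 2 ≤ (PySem.Str.split₀ inm.2).length ∧
        6 ≤ PySem.Str.len (PySem.List.pyGetD (PySem.Str.split₀ inm.2) (-1) "")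
    · have hq : 2 ≤ (PySem.Str.split₀ inm.2).length ∧
          6 ≤ (PySem.List.pyGetD (PySem.Str.split₀ inm.2) (-1) "").length := by
        refine ⟨h.1, ?_⟩
        have h2 := h.2
        rw [PySem.Str.len_eq] at h2
        exact_mod_cast h2
      simp [pmPats1, h, hq]
    · have hq : ¬ (2 ≤ (PySem.Str.split₀ inm.2).length ∧
          6 ≤ (PySem.List.pyGetD (PySem.Str.split₀ inm.2) (-1) "").length) := by
        intro hc
        exact h ⟨hc.1, by rw [PySem.Str.len_eq]; exact_mod_cast hc.2⟩
      simp [pmPats1, h, hq]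
  rw [hstep, PySem.List.foldl_append_eq_flatMap]
  simp

-- running minimum over a list of candidate indices
def pmMinOver (b0 : Int) (S : List Int) : Int := S.foldl min b0

lemma pmMinOver_append (b0 : Int) (S T : List Int) :
    pmMinOver b0 (S ++ T) = pmMinOver (pmMinOver b0 S) T := by
  simp [pmMinOver, List.foldl_append]

lemma pmMinOver_le_init (b0 : Int) (S : List Int) : pmMinOver b0 S ≤ b0 := by
  induction S generalizing b0 with
  | nil => simp [pmMinOver]
  | cons a S ih =>
    simp only [pmMinOver, List.foldl_cons]
    exact le_trans (ih (min b0 a)) (min_le_left _ _)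

lemma pmMinOver_le_mem (b0 : Int) (S : List Int) (x : Int) (h : x ∈ S) :
    pmMinOver b0 S ≤ x := by
  induction S generalizing b0 with
  | nil => simp at h
  | cons a S ih =>
    simp only [pmMinOver, List.foldl_cons]
    rcases List.mem_cons.mp h with rfl | h'
    · exact le_trans (pmMinOver_le_init _ _) (min_le_right _ _)
    · exact ih (min b0 a) h'

lemma pmMinOver_mem_or (b0 : Int) (S : List Int) :
    pmMinOver b0 S = b0 ∨ pmMinOver b0 S ∈ S := by
  induction S generalizing b0 with
  | nil => simp [pmMinOver]
  | cons a S ih =>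
    have hcons : pmMinOver b0 (a :: S) = pmMinOver (min b0 a) S := rfl
    rw [hcons]
    rcases ih (min b0 a) with h | h
    · rcases le_or_gt b0 a with hba | hba
      · left; rw [h, min_eq_left hba]
      · right; rw [h, min_eq_right (le_of_lt hba)]; exact List.mem_cons_self
    · right; exact List.mem_cons_of_mem _ h

lemma pmMinOver_congr (b0 : Int) (S T : List Int) (h : ∀ x, x ∈ S ↔ x ∈ T) :
    pmMinOver b0 S = pmMinOver b0 T := by
  apply le_antisymm
  · rcases pmMinOver_mem_or b0 T with he | he
    · rw [he]; exact pmMinOver_le_init _ _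
    · exact pmMinOver_le_mem _ _ _ ((h _).mpr he)
  · rcases pmMinOver_mem_or b0 S with he | he
    · rw [he]; exact pmMinOver_le_init _ _
    · exact pmMinOver_le_mem _ _ _ ((h _).mp he)

lemma pmMinFold {α : Type} (l : List α) (f : α → Bool) (g : α → Int) (b0 : Int) :
    l.foldl (fun b x => if f x then min b (g x) else b) b0
      = pmMinOver b0 ((l.filter f).map g) := by
  induction l generalizing b0 with
  | nil => simp [pmMinOver]
  | cons a l ih =>
    by_cases h : f a = true <;>
      simp [List.filter_cons, h, ih, pmMinOver]

lemma pmFlatFold {α : Type} (l : List α) (F : α → List Int) (b0 : Int) :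
    l.foldl (fun b x => pmMinOver b (F x)) b0 = pmMinOver b0 (l.flatMap F) := by
  induction l generalizing b0 with
  | nil => simp [pmMinOver]
  | cons a l ih =>
    rw [List.foldl_cons, List.flatMap_cons, pmMinOver_append, ih]

lemma pmPrepFold_fst (pats : List (String × Int)) (b : Int)
    (d : PySem.Dict Char (List (String × Int))) :
    (pats.foldl (fun bb pi =>
      if pi.1 = "" then (if pi.2 < bb.1 then pi.2 else bb.1, bb.2)
      else (bb.1, bb.2.modify (pmKey pi.1) [] (· ++ [pi]))) (b, d)).1
    = pmMinOver b ((pats.filter (fun pi => pi.1 == "")).map (·.2)) := by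
  induction pats generalizing b d with
  | nil => simp [pmMinOver]
  | cons pi pats ih =>
    by_cases h : pi.1 = ""
    · have hm : (if pi.2 < b then pi.2 else b) = min b pi.2 := by omega
      simp [List.filter_cons, h, ih, pmMinOver, hm]
    · simp [List.filter_cons, h, ih]

lemma pmPrepFold_snd (pats : List (String × Int)) (b : Int)
    (d : PySem.Dict Char (List (String × Int))) (c : Char) :
    ((pats.foldl (fun bb pi =>
      if pi.1 = "" then (if pi.2 < bb.1 then pi.2 else bb.1, bb.2)
      else (bb.1, bb.2.modify (pmKey pi.1) [] (· ++ [pi]))) (b, d)).2).getD c []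
    = d.getD c [] ++ pats.filter (fun pi => !(pi.1 == "") && (pmKey pi.1 == c)) := by
  induction pats generalizing b d with
  | nil => simp
  | cons pi pats ih =>
    by_cases h : pi.1 = ""
    · simp [List.filter_cons, h, ih]
    · rw [List.foldl_cons]
      simp only [if_neg h]
      rw [ih, PySem.Dict.getD_modify]
      by_cases hc : c = pmKey pi.1
      · rw [if_pos hc, hc]
        simp [List.filter_cons, h, List.append_assoc]
      · rw [if_neg hc]
        have hc' : pmKey pi.1 ≠ c := fun he => hc he.symm
        simp [List.filter_cons, h, hc']

lemma pmBScan_eq (text : String) (buckets : PySem.Dict Char (List (String × Int)))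
    (best0 : Int) :
    pmBScan text buckets best0
      = pmMinOver best0 ((PySem.List.enumerate text.toList).flatMap (fun jc =>
          (((buckets.getD jc.2 []).filter (fun pi =>
            PySem.Str.startswith (PySem.Str.slice text (some jc.1) none) pi.1)).map (·.2)))) := by
  unfold pmBScan
  have hstep : (fun (best : Int) (jc : Int × Char) =>
      (buckets.getD jc.2 []).foldl (fun best pi =>
        if pi.2 < best ∧ PySem.Str.startswith (PySem.Str.slice text (some jc.1) none) pi.1
        then pi.2 else best) best)
      = fun best jc => pmMinOver best (((buckets.getD jc.2 []).filter (fun pi =>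
          PySem.Str.startswith (PySem.Str.slice text (some jc.1) none) pi.1)).map (·.2)) := by
    funext best jc
    have hf : (fun (b : Int) (pi : String × Int) =>
        if pi.2 < b ∧ PySem.Str.startswith (PySem.Str.slice text (some jc.1) none) pi.1
        then pi.2 else b)
        = fun b pi => if PySem.Str.startswith (PySem.Str.slice text (some jc.1) none) pi.1
            then min b pi.2 else b := by
      funext b pi
      by_cases hs : PySem.Str.startswith (PySem.Str.slice text (some jc.1) none) pi.1 = true
      · by_cases hlt : pi.2 < b
        · rw [if_pos ⟨hlt, hs⟩, if_pos hs]
          omega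
        · rw [if_neg (fun hc => hlt hc.1), if_pos hs]
          omega
      · rw [if_neg (fun hc => hs hc.2), if_neg hs]
    rw [hf, pmMinFold]
  rw [hstep, pmFlatFold]

lemma pmMemEnumerate {α : Type} (l : List α) (s : Int) (x : Int × α) :
    x ∈ PySem.List.enumerate l s ↔ ∃ (k : Nat), ∃ (_ : k < l.length), x = (s + k, l[k]) := by
  induction l generalizing s with
  | nil => simp [PySem.List.enumerate]
  | cons a t ih =>
    simp only [PySem.List.enumerate, List.mem_cons, ih]
    constructor
    · rintro (rfl | ⟨k, hk, rfl⟩)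
      · exact ⟨0, by simp, by simp⟩
      · refine ⟨k + 1, by simp only [List.length_cons]; omega, ?_⟩
        simp only [Prod.mk.injEq]
        constructor
        · push_cast; ring
        · simp
    · rintro ⟨k, hk, rfl⟩
      cases k with
      | zero => left; simp
      | succ k =>
        right
        refine ⟨k, by simp only [List.length_cons] at hk; omega, ?_⟩
        simp only [Prod.mk.injEq]
        constructor
        · push_cast; ring
        · simp

-- the bucket key of a nonempty pattern is its first character
lemma pmKey_head (p : String) (c : Char) (cs : List Char) (h : p.toList = c :: cs) :
    pmKey p = c := by
  unfold pmKey
  have h0 : PySem.Str.pyGet? p 0 = p.toList[(0 : Nat)]? := PySem.Str.pyGet?_natCast p 0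
  rw [h0, h]
  rfl

-- membership in B's candidate pool = membership in the 'pattern occurs in text' pool
lemma pmMemIff (text : String) (pats : List (String × Int)) (x : Int) :
    (x ∈ ((pats.filter (fun pi => pi.1 == "")).map (·.2)
        ++ (PySem.List.enumerate text.toList).flatMap (fun jc =>
          (((pats.filter (fun pi => !(pi.1 == "") && (pmKey pi.1 == jc.2))).filter (fun pi =>
            PySem.Str.startswith (PySem.Str.slice text (some jc.1) none) pi.1)).map (·.2)))))
    ↔ x ∈ (pats.filter (fun pi => PySem.Str.isIn pi.1 text)).map (·.2) := by
  simp only [List.mem_append, List.mem_map, List.mem_filter, List.mem_flatMap,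
    Bool.and_eq_true, Bool.not_eq_true', beq_iff_eq, beq_eq_false_iff_ne, ne_eq,
    PySem.Str.isIn_eq, PySem.Str.startswith_eq, PySem.Str.toList_slice,
    PySem.Chars.slice_eq_listSlice]
  constructor
  · rintro (⟨pi, ⟨hpi, hempty⟩, rfl⟩ | ⟨jc, hjc, pi, ⟨⟨hpi, _, _⟩, hsw⟩, rfl⟩)
    · refine ⟨pi, ⟨hpi, ?_⟩, rfl⟩
      rw [hempty]
      simpa using PySem.Chars.isIn_nil text.toList
    · obtain ⟨k, hk, rfl⟩ := (pmMemEnumerate _ _ _).mp hjc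
      rw [PySem.List.slice_from _ (by positivity)] at hsw
      have hpre := (PySem.Chars.startswith_iff _ _).mp hsw
      exact ⟨pi, ⟨hpi, (PySem.Chars.exists_prefix_drop_iff_isIn _ _).mp
        ⟨(0 + (k : Int)).toNat, hpre⟩⟩, rfl⟩
  · rintro ⟨pi, ⟨hpi, hin⟩, rfl⟩
    by_cases he : pi.1 = ""
    · exact Or.inl ⟨pi, ⟨hpi, he⟩, rfl⟩
    · right
      obtain ⟨j, hpre⟩ := (PySem.Chars.exists_prefix_drop_iff_isIn _ _).mpr hin
      have hne : pi.1.toList ≠ [] := fun hc => he (String.toList_eq_nil_iff.mp hc)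
      obtain ⟨c, cs, hcons⟩ := List.exists_cons_of_ne_nil hne
      have hdropne : text.toList.drop j ≠ [] := by
        intro hd
        rw [hd, List.prefix_nil, hcons] at hpre
        exact absurd hpre (by simp)
      have hjlt : j < text.toList.length := by
        by_contra hge
        exact hdropne (List.drop_eq_nil_of_le (by omega))
      have hhead : text.toList[j] = c := by
        have h1 : text.toList[j]? = some c := by
          rw [← List.head?_drop]
          obtain ⟨t2, ht2⟩ := hpre
          rw [← ht2, hcons]
          rfl
        rw [List.getElem?_eq_getElem hjlt] at h1
        exact Option.some.inj h1
      refine ⟨((j : Int), text.toList[j]), (pmMemEnumerate _ _ _).mpr ⟨j, hjlt, by simp⟩,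
        pi, ⟨⟨hpi, he, ?_⟩, ?_⟩, rfl⟩
      · rw [pmKey_head pi.1 c cs hcons, hhead]
      · rw [PySem.List.slice_from _ (by positivity), Int.toNat_natCast,
          PySem.Chars.startswith_iff]
        exact hpre

-- per-name: some pattern of the name occurs in the text iff A's test holds
lemma pmPats1_any (text name : String) :
    ((pmPats1 name).any (fun p => PySem.Str.isIn p text)) = pmPredA text name := by
  unfold pmPats1 pmPredA
  by_cases h : 2 ≤ (PySem.Str.split₀ name).length ∧
      6 ≤ PySem.Str.len (PySem.List.pyGetD (PySem.Str.split₀ name) (-1) "")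
  · have h2n : 6 ≤ (PySem.List.pyGetD (PySem.Str.split₀ name) (-1) "").length := by
      have h2 := h.2
      rw [PySem.Str.len_eq] at h2
      exact_mod_cast h2
    simp [h, h.1, h2n]
  · rcases (not_and_or.mp h) with h' | h'
    · simp [h, h']
    · have h'n : ¬ 6 ≤ (PySem.List.pyGetD (PySem.Str.split₀ name) (-1) "").length := by
        intro hc
        exact h' (by rw [PySem.Str.len_eq]; exact_mod_cast hc)
      simp [h, h'n]

-- the matched-index pool, in terms of A's per-name test
lemma pmMatchedIff (text : String) (names : List String) (x : Int) :
    x ∈ ((pmBPats names).filter (fun pi => PySem.Str.isIn pi.1 text)).map (·.2)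
    ↔ ∃ (k : Nat), ∃ (_ : k < names.length), x = (k : Int) ∧ pmPredA text names[k] = true := by
  rw [pmBPats_eq]
  simp only [List.mem_map, List.mem_filter, List.mem_flatMap, pmMemEnumerate, List.mem_map]
  constructor
  · rintro ⟨pi, ⟨⟨inm, ⟨k, hk, rfl⟩, p, hp, rfl⟩, hin⟩, rfl⟩
    refine ⟨k, hk, by simp, ?_⟩
    rw [← pmPats1_any]
    exact List.any_eq_true.mpr ⟨p, hp, hin⟩
  · rintro ⟨k, hk, rfl, hpred⟩
    rw [← pmPats1_any] at hpred
    obtain ⟨p, hp, hin⟩ := List.any_eq_true.mp hpred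
    exact ⟨(p, (k : Int)), ⟨⟨((k : Int), names[k]), ⟨k, hk, by simp⟩, p, hp, rfl⟩, hin⟩, rfl⟩

-- A's loop returns the first-index match
lemma pmGoA_findIdx (text : String) (names : List String) :
    pmGoA text names =
      if h : names.findIdx (pmPredA text) < names.length
      then some (names[names.findIdx (pmPredA text)]) else none := by
  induction names with
  | nil => simp [pmGoA]
  | cons n rest ih =>
    rw [pmGoA_cons, List.findIdx_cons]
    by_cases hp : pmPredA text n = true
    · simp [hp]
    · have hb : pmPredA text n = false := by simpa using hp
      simp only [hb, cond_false, ih]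
      by_cases hlt : rest.findIdx (pmPredA text) < rest.length
      · rw [dif_pos hlt, dif_pos (by simpa using Nat.succ_lt_succ hlt)]
        simp
      · rw [dif_neg hlt, dif_neg (by simpa using fun h => hlt (Nat.lt_of_succ_lt_succ h))]
        simp

-- B's final best equals A's first matching index
lemma pmBest_eq (text : String) (names : List String) :
    pmBScan text (pmBPrep (names.length : Int) (pmBPats names)).2
        (pmBPrep (names.length : Int) (pmBPats names)).1
      = (names.findIdx (pmPredA text) : Int) := by
  have hprep1 : (pmBPrep (names.length : Int) (pmBPats names)).1
      = pmMinOver (names.length : Int)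
          (((pmBPats names).filter (fun pi => pi.1 == "")).map (·.2)) := by
    unfold pmBPrep
    exact pmPrepFold_fst _ _ _
  have hprep2 : ∀ c, ((pmBPrep (names.length : Int) (pmBPats names)).2).getD c []
      = (pmBPats names).filter (fun pi => !(pi.1 == "") && (pmKey pi.1 == c)) := by
    intro c
    unfold pmBPrep
    rw [pmPrepFold_snd]
    simp
  rw [pmBScan_eq]
  simp only [hprep2, hprep1]
  rw [← pmMinOver_append]
  rw [pmMinOver_congr _ _ _ (pmMemIff text (pmBPats names))]
  apply le_antisymm
  · by_cases hlt : names.findIdx (pmPredA text) < names.length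
    · apply pmMinOver_le_mem
      exact (pmMatchedIff text names _).mpr
        ⟨names.findIdx (pmPredA text), hlt, rfl, List.findIdx_getElem (w := hlt)⟩
    · have heq : names.findIdx (pmPredA text) = names.length :=
        le_antisymm List.findIdx_le_length (by omega)
      rw [heq]
      exact pmMinOver_le_init _ _
  · rcases pmMinOver_mem_or (names.length : Int)
        (((pmBPats names).filter (fun pi => PySem.Str.isIn pi.1 text)).map (·.2)) with he | he
    · rw [he]
      exact_mod_cast List.findIdx_le_length
    · obtain ⟨k, hk, hkx, hpred⟩ := (pmMatchedIff text names _).mp he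
      rw [hkx]
      have hle : names.findIdx (pmPredA text) ≤ k := by
        by_contra hgt
        have hfalse := List.not_of_lt_findIdx (by omega : k < names.findIdx (pmPredA text))
        exact absurd (hpred.symm.trans hfalse) (by simp)
      exact_mod_cast hle

-- ===== VERDICT (by name: the statement is the Claim_ definition above) =====
theorem player_mentioned_py_spec : Claim_equal_player_mentioned_py := by
  intro tweet_text player_names _
  unfold Spec_player_mentioned_py player_mentioned_py player_mentioned_py_alt
  dsimp only
  rw [pmBest_eq, pmGoA_findIdx]
  by_cases hlt : player_names.findIdx (pmPredA (PySem.Str.lower tweet_text)) < player_names.length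
  · rw [dif_pos hlt, if_pos (by exact_mod_cast hlt)]
    rw [PySem.List.pyGetD_eq_getElem _ _ (by positivity) (by exact_mod_cast hlt)]
    simp
  · rw [dif_neg hlt, if_neg (by exact_mod_cast hlt)]
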